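-- pv_equiv track=rewrite | github.com/shreyaa0008/medical_chatbot | app.py | determine_specialty_from_tags
-- ===== SOURCE A (Python) =====
-- from typing import List, Dict, Optional
--
-- def determine_specialty_from_tags(tags: Dict) -> str:
--     """Determine medical specialty from OpenStreetMap tags"""
--     # Check healthcare specialty tag
--     healthcare = tags.get("healthcare", "").lower()
--     if "cardiology" in healthcare or "heart" in healthcare:
--         return "Cardiology"
--     elif "orthopedic" in healthcare or "orthopaedic" in healthcare:
--         return "Orthopedics"
--     elif "neurology" in healthcare or "neuro" in healthcare:
--         return "Neurology"
--     elif "pediatric" in healthcare or "children" in healthcare: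
--         return "Pediatrics"
--     elif "cancer" in healthcare or "oncology" in healthcare:
--         return "Oncology"
--     elif "emergency" in healthcare:
--         return "Emergency Medicine"
--
--     # Check name for specialty indicators
--     name = tags.get("name", "").lower()
--     if any(word in name for word in ["heart", "cardiac", "cardio"]):
--         return "Cardiology"
--     elif any(word in name for word in ["bone", "joint", "orthopedic", "orthopaedic"]):
--         return "Orthopedics"
--     elif any(word in name for word in ["brain", "neuro", "neurological"]):
--         return "Neurology"
--     elif any(word in name for word in ["children", "pediatric", "paediatric", "kids"]):
--         return "Pediatrics"
--     elif any(word in name for word in ["cancer", "oncology", "tumor"]):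
--         return "Oncology"
--     elif any(word in name for word in ["emergency", "trauma", "urgent"]):
--         return "Emergency Medicine"
--     elif any(word in name for word in ["women", "maternity", "obstetric"]):
--         return "Obstetrics & Gynecology"
--     elif any(word in name for word in ["eye", "vision", "optical"]):
--         return "Ophthalmology"
--     elif any(word in name for word in ["dental", "tooth", "oral"]):
--         return "Dentistry"
--     elif any(word in name for word in ["skin", "dermatology"]):
--         return "Dermatology"
--
--     # Default based on facility type
--     amenity = tags.get("amenity", "")
--     if amenity == "hospital":
--         return "General Medicine"
--     elif amenity == "clinic":
--         return "General Practice"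
--     else:
--         return "General Practice"
-- ===== SOURCE B (Python) =====
-- # Inverted keyword index: one flat dict keyword -> (rank, label); the answer is the
-- # minimum-rank matching keyword (argmin aggregation, no early-return ladder).
-- _KEYWORD_INDEX = {
--     ("healthcare", "cardiology"): (0, "Cardiology"),
--     ("healthcare", "heart"): (0, "Cardiology"),
--     ("healthcare", "orthopedic"): (1, "Orthopedics"),
--     ("healthcare", "orthopaedic"): (1, "Orthopedics"),
--     ("healthcare", "neurology"): (2, "Neurology"),
--     ("healthcare", "neuro"): (2, "Neurology"),
--     ("healthcare", "pediatric"): (3, "Pediatrics"),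
--     ("healthcare", "children"): (3, "Pediatrics"),
--     ("healthcare", "cancer"): (4, "Oncology"),
--     ("healthcare", "oncology"): (4, "Oncology"),
--     ("healthcare", "emergency"): (5, "Emergency Medicine"),
--     ("name", "heart"): (6, "Cardiology"),
--     ("name", "cardiac"): (6, "Cardiology"),
--     ("name", "cardio"): (6, "Cardiology"),
--     ("name", "bone"): (7, "Orthopedics"),
--     ("name", "joint"): (7, "Orthopedics"),
--     ("name", "orthopedic"): (7, "Orthopedics"),
--     ("name", "orthopaedic"): (7, "Orthopedics"),
--     ("name", "brain"): (8, "Neurology"),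
--     ("name", "neuro"): (8, "Neurology"),
--     ("name", "neurological"): (8, "Neurology"),
--     ("name", "children"): (9, "Pediatrics"),
--     ("name", "pediatric"): (9, "Pediatrics"),
--     ("name", "paediatric"): (9, "Pediatrics"),
--     ("name", "kids"): (9, "Pediatrics"),
--     ("name", "cancer"): (10, "Oncology"),
--     ("name", "oncology"): (10, "Oncology"),
--     ("name", "tumor"): (10, "Oncology"),
--     ("name", "emergency"): (11, "Emergency Medicine"),
--     ("name", "trauma"): (11, "Emergency Medicine"),
--     ("name", "urgent"): (11, "Emergency Medicine"),
--     ("name", "women"): (12, "Obstetrics & Gynecology"),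
--     ("name", "maternity"): (12, "Obstetrics & Gynecology"),
--     ("name", "obstetric"): (12, "Obstetrics & Gynecology"),
--     ("name", "eye"): (13, "Ophthalmology"),
--     ("name", "vision"): (13, "Ophthalmology"),
--     ("name", "optical"): (13, "Ophthalmology"),
--     ("name", "dental"): (14, "Dentistry"),
--     ("name", "tooth"): (14, "Dentistry"),
--     ("name", "oral"): (14, "Dentistry"),
--     ("name", "skin"): (15, "Dermatology"),
--     ("name", "dermatology"): (15, "Dermatology"),
-- }
--
-- def determine_specialty_from_tags(tags):
--     texts = {field: tags.get(field, "").lower() for field in ("healthcare", "name")}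
--     best = None
--     for (field, keyword), (rank, label) in _KEYWORD_INDEX.items():
--         if keyword in texts[field] and (best is None or rank < best[0]):
--             best = (rank, label)
--     if best is not None:
--         return best[1]
--     return "General Medicine" if tags.get("amenity", "") == "hospital" else "General Practice"
-- ===== Notes on version B (the rewrite author's own statement) =====
-- stated objective: alternative
-- what changed: Replaced the 16-branch if/elif early-return ladder by a flat inverted keyword index (one dict entry per keyword mapping to a (rank,label) pair) that is scanned in full with a running argmin accumulator; the minimum-rank matching keyword decides, and the amenity fallback is a single conditional expression.
import Mathlib
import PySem

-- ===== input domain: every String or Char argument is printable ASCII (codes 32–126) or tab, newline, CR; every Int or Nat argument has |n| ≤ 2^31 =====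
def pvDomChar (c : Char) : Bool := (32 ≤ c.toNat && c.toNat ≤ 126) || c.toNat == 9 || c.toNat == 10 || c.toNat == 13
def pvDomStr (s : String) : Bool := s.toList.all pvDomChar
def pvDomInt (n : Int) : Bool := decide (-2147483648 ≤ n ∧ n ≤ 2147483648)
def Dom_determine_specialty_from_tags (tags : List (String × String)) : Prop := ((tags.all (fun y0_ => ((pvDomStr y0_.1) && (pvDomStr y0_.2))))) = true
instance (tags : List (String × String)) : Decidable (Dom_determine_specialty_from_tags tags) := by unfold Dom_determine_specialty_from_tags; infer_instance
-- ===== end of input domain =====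

-- B replaces A's 16-branch if/elif early-return ladder by a flat inverted keyword index
-- (keyword -> (rank, label)) scanned in full with a running argmin accumulator (objective:
-- alternative); both programs are pure, return value only.

-- ===== PORT A =====
def determine_specialty_from_tags (tags : List (String × String)) : String :=
  let healthcare := PySem.Str.lower (PySem.Dict.getD (PySem.Dict.mk tags) "healthcare" "")
  if PySem.Str.isIn "cardiology" healthcare || PySem.Str.isIn "heart" healthcare then "Cardiology"
  else if PySem.Str.isIn "orthopedic" healthcare || PySem.Str.isIn "orthopaedic" healthcare then "Orthopedics"
  else if PySem.Str.isIn "neurology" healthcare || PySem.Str.isIn "neuro" healthcare then "Neurology"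
  else if PySem.Str.isIn "pediatric" healthcare || PySem.Str.isIn "children" healthcare then "Pediatrics"
  else if PySem.Str.isIn "cancer" healthcare || PySem.Str.isIn "oncology" healthcare then "Oncology"
  else if PySem.Str.isIn "emergency" healthcare then "Emergency Medicine"
  else
    let name := PySem.Str.lower (PySem.Dict.getD (PySem.Dict.mk tags) "name" "")
    if ["heart", "cardiac", "cardio"].any (fun w => PySem.Str.isIn w name) then "Cardiology"
    else if ["bone", "joint", "orthopedic", "orthopaedic"].any (fun w => PySem.Str.isIn w name) then "Orthopedics"
    else if ["brain", "neuro", "neurological"].any (fun w => PySem.Str.isIn w name) then "Neurology"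
    else if ["children", "pediatric", "paediatric", "kids"].any (fun w => PySem.Str.isIn w name) then "Pediatrics"
    else if ["cancer", "oncology", "tumor"].any (fun w => PySem.Str.isIn w name) then "Oncology"
    else if ["emergency", "trauma", "urgent"].any (fun w => PySem.Str.isIn w name) then "Emergency Medicine"
    else if ["women", "maternity", "obstetric"].any (fun w => PySem.Str.isIn w name) then "Obstetrics & Gynecology"
    else if ["eye", "vision", "optical"].any (fun w => PySem.Str.isIn w name) then "Ophthalmology"
    else if ["dental", "tooth", "oral"].any (fun w => PySem.Str.isIn w name) then "Dentistry"
    else if ["skin", "dermatology"].any (fun w => PySem.Str.isIn w name) then "Dermatology"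
    else
      let amenity := PySem.Dict.getD (PySem.Dict.mk tags) "amenity" ""
      if amenity = "hospital" then "General Medicine"
      else if amenity = "clinic" then "General Practice"
      else "General Practice"

-- ===== PORT B =====
-- _KEYWORD_INDEX of Source B: flat inverted index (field, keyword) -> (rank, label)
def pvKeywordIndex : List ((String × String) × (Nat × String)) :=
  [ (("healthcare", "cardiology"), (0, "Cardiology")),
    (("healthcare", "heart"), (0, "Cardiology")),
    (("healthcare", "orthopedic"), (1, "Orthopedics")),
    (("healthcare", "orthopaedic"), (1, "Orthopedics")),
    (("healthcare", "neurology"), (2, "Neurology")),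
    (("healthcare", "neuro"), (2, "Neurology")),
    (("healthcare", "pediatric"), (3, "Pediatrics")),
    (("healthcare", "children"), (3, "Pediatrics")),
    (("healthcare", "cancer"), (4, "Oncology")),
    (("healthcare", "oncology"), (4, "Oncology")),
    (("healthcare", "emergency"), (5, "Emergency Medicine")),
    (("name", "heart"), (6, "Cardiology")),
    (("name", "cardiac"), (6, "Cardiology")),
    (("name", "cardio"), (6, "Cardiology")),
    (("name", "bone"), (7, "Orthopedics")),
    (("name", "joint"), (7, "Orthopedics")),
    (("name", "orthopedic"), (7, "Orthopedics")),
    (("name", "orthopaedic"), (7, "Orthopedics")),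
    (("name", "brain"), (8, "Neurology")),
    (("name", "neuro"), (8, "Neurology")),
    (("name", "neurological"), (8, "Neurology")),
    (("name", "children"), (9, "Pediatrics")),
    (("name", "pediatric"), (9, "Pediatrics")),
    (("name", "paediatric"), (9, "Pediatrics")),
    (("name", "kids"), (9, "Pediatrics")),
    (("name", "cancer"), (10, "Oncology")),
    (("name", "oncology"), (10, "Oncology")),
    (("name", "tumor"), (10, "Oncology")),
    (("name", "emergency"), (11, "Emergency Medicine")),
    (("name", "trauma"), (11, "Emergency Medicine")),
    (("name", "urgent"), (11, "Emergency Medicine")),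
    (("name", "women"), (12, "Obstetrics & Gynecology")),
    (("name", "maternity"), (12, "Obstetrics & Gynecology")),
    (("name", "obstetric"), (12, "Obstetrics & Gynecology")),
    (("name", "eye"), (13, "Ophthalmology")),
    (("name", "vision"), (13, "Ophthalmology")),
    (("name", "optical"), (13, "Ophthalmology")),
    (("name", "dental"), (14, "Dentistry")),
    (("name", "tooth"), (14, "Dentistry")),
    (("name", "oral"), (14, "Dentistry")),
    (("name", "skin"), (15, "Dermatology")),
    (("name", "dermatology"), (15, "Dermatology")) ]

-- the loop body of Source B: keep the lower-rank match (argmin accumulator)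
def pvStep (texts : PySem.Dict String String) (best : Option (Nat × String))
    (e : (String × String) × (Nat × String)) : Option (Nat × String) :=
  if PySem.Str.isIn e.1.2 (PySem.Dict.getD texts e.1.1 "") &&
     (match best with | none => true | some b => decide (e.2.1 < b.1))
  then some e.2 else best

def determine_specialty_from_tags_alt (tags : List (String × String)) : String :=
  let texts := PySem.Dict.mk (["healthcare", "name"].map
      (fun field => (field, PySem.Str.lower (PySem.Dict.getD (PySem.Dict.mk tags) field ""))))
  match pvKeywordIndex.foldl (pvStep texts) none with
  | some b => b.2
  | none =>
      if PySem.Dict.getD (PySem.Dict.mk tags) "amenity" "" = "hospital" then "General Medicine"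
      else "General Practice"

-- ===== PRECONDITION & SPEC =====
def Spec_determine_specialty_from_tags (tags : List (String × String)) (out : String) : Prop := out = determine_specialty_from_tags_alt tags
instance (tags : List (String × String)) (out : String) : Decidable (Spec_determine_specialty_from_tags tags out) := by unfold Spec_determine_specialty_from_tags; infer_instance

-- ===== CLAIM (what is proved, stated in full; the proofs are below) =====
def Claim_equal_determine_specialty_from_tags : Prop := ∀ (tags : List (String × String)), Dom_determine_specialty_from_tags tags → Spec_determine_specialty_from_tags tags (determine_specialty_from_tags tags)

-- ===== LEMMAS AND PROOFS =====

theorem pvStep_skip (texts : PySem.Dict String String) (best : Option (Nat × String))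
    (f w : String) (r : Nat) (l : String)
    (h : PySem.Str.isIn w (PySem.Dict.getD texts f "") = false) :
    pvStep texts best ((f, w), (r, l)) = best := by unfold pvStep; rw [h]; simp

theorem pvStep_hit (texts : PySem.Dict String String) (f w : String) (r : Nat) (l : String)
    (h : PySem.Str.isIn w (PySem.Dict.getD texts f "") = true) :
    pvStep texts none ((f, w), (r, l)) = some (r, l) := by unfold pvStep; rw [h]; simp

-- once the accumulator holds a rank no later entry beats, the rest of the scan keeps it
theorem pvFold_keep (L : List ((String × String) × (Nat × String)))
    (texts : PySem.Dict String String) (p : Nat) (l : String)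
    (hp : ∀ e ∈ L, p ≤ e.2.1) :
    L.foldl (pvStep texts) (some (p, l)) = some (p, l) := by
  induction L with
  | nil => rfl
  | cons e t ih =>
      have h1 : p ≤ e.2.1 := hp e (by simp)
      have h2 : pvStep texts (some (p, l)) e = some (p, l) := by
        unfold pvStep; simp [Nat.not_lt.mpr h1]
      rw [List.foldl_cons, h2, ih (fun x hx => hp x (by simp [hx]))]

-- ===== VERDICT (by name: the statement is the Claim_ definition above) =====
set_option maxHeartbeats 4000000 in
theorem determine_specialty_from_tags_spec : Claim_equal_determine_specialty_from_tags := by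
  intro tags _
  unfold Spec_determine_specialty_from_tags
  simp only [determine_specialty_from_tags, determine_specialty_from_tags_alt, List.map_cons, List.map_nil]
  generalize PySem.Str.lower (PySem.Dict.getD (PySem.Dict.mk tags) "healthcare" "") = hc
  generalize PySem.Str.lower (PySem.Dict.getD (PySem.Dict.mk tags) "name" "") = nm
  generalize PySem.Dict.getD (PySem.Dict.mk tags) "amenity" "" = am
  have e1 : PySem.Dict.getD (PySem.Dict.mk [("healthcare", hc), ("name", nm)]) "healthcare" "" = hc := rfl
  have e2 : PySem.Dict.getD (PySem.Dict.mk [("healthcare", hc), ("name", nm)]) "name" "" = nm := rfl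
  simp only [pvKeywordIndex]
  by_cases h0 : PySem.Str.isIn "cardiology" hc = true
  · rw [List.foldl_cons, pvStep_hit _ _ _ _ _ (by rw [e1]; exact h0),
        pvFold_keep _ _ _ _ (by decide)]
    simp only [h0, List.any_cons, List.any_nil, Bool.true_or, Bool.or_true, Bool.false_or, Bool.or_false, Bool.or_self, reduceIte] <;> rfl
  rw [Bool.not_eq_true] at h0
  rw [List.foldl_cons, pvStep_skip _ _ _ _ _ _ (by rw [e1]; exact h0)]
  by_cases h1 : PySem.Str.isIn "heart" hc = true
  · rw [List.foldl_cons, pvStep_hit _ _ _ _ _ (by rw [e1]; exact h1),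
        pvFold_keep _ _ _ _ (by decide)]
    simp only [h0, h1, List.any_cons, List.any_nil, Bool.true_or, Bool.or_true, Bool.false_or, Bool.or_false, Bool.or_self, reduceIte] <;> rfl
  rw [Bool.not_eq_true] at h1
  rw [List.foldl_cons, pvStep_skip _ _ _ _ _ _ (by rw [e1]; exact h1)]
  by_cases h2 : PySem.Str.isIn "orthopedic" hc = true
  · rw [List.foldl_cons, pvStep_hit _ _ _ _ _ (by rw [e1]; exact h2),
        pvFold_keep _ _ _ _ (by decide)]
    simp only [h0, h1, h2, List.any_cons, List.any_nil, Bool.true_or, Bool.or_true, Bool.false_or, Bool.or_false, Bool.or_self, reduceIte] <;> rfl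
  rw [Bool.not_eq_true] at h2
  rw [List.foldl_cons, pvStep_skip _ _ _ _ _ _ (by rw [e1]; exact h2)]
  by_cases h3 : PySem.Str.isIn "orthopaedic" hc = true
  · rw [List.foldl_cons, pvStep_hit _ _ _ _ _ (by rw [e1]; exact h3),
        pvFold_keep _ _ _ _ (by decide)]
    simp only [h0, h1, h2, h3, List.any_cons, List.any_nil, Bool.true_or, Bool.or_true, Bool.false_or, Bool.or_false, Bool.or_self, reduceIte] <;> rfl
  rw [Bool.not_eq_true] at h3
  rw [List.foldl_cons, pvStep_skip _ _ _ _ _ _ (by rw [e1]; exact h3)]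
  by_cases h4 : PySem.Str.isIn "neurology" hc = true
  · rw [List.foldl_cons, pvStep_hit _ _ _ _ _ (by rw [e1]; exact h4),
        pvFold_keep _ _ _ _ (by decide)]
    simp only [h0, h1, h2, h3, h4, List.any_cons, List.any_nil, Bool.true_or, Bool.or_true, Bool.false_or, Bool.or_false, Bool.or_self, reduceIte] <;> rfl
  rw [Bool.not_eq_true] at h4
  rw [List.foldl_cons, pvStep_skip _ _ _ _ _ _ (by rw [e1]; exact h4)]
  by_cases h5 : PySem.Str.isIn "neuro" hc = true
  · rw [List.foldl_cons, pvStep_hit _ _ _ _ _ (by rw [e1]; exact h5),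
        pvFold_keep _ _ _ _ (by decide)]
    simp only [h0, h1, h2, h3, h4, h5, List.any_cons, List.any_nil, Bool.true_or, Bool.or_true, Bool.false_or, Bool.or_false, Bool.or_self, reduceIte] <;> rfl
  rw [Bool.not_eq_true] at h5
  rw [List.foldl_cons, pvStep_skip _ _ _ _ _ _ (by rw [e1]; exact h5)]
  by_cases h6 : PySem.Str.isIn "pediatric" hc = true
  · rw [List.foldl_cons, pvStep_hit _ _ _ _ _ (by rw [e1]; exact h6),
        pvFold_keep _ _ _ _ (by decide)]
    simp only [h0, h1, h2, h3, h4, h5, h6, List.any_cons, List.any_nil, Bool.true_or, Bool.or_true, Bool.false_or, Bool.or_false, Bool.or_self, reduceIte] <;> rfl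
  rw [Bool.not_eq_true] at h6
  rw [List.foldl_cons, pvStep_skip _ _ _ _ _ _ (by rw [e1]; exact h6)]
  by_cases h7 : PySem.Str.isIn "children" hc = true
  · rw [List.foldl_cons, pvStep_hit _ _ _ _ _ (by rw [e1]; exact h7),
        pvFold_keep _ _ _ _ (by decide)]
    simp only [h0, h1, h2, h3, h4, h5, h6, h7, List.any_cons, List.any_nil, Bool.true_or, Bool.or_true, Bool.false_or, Bool.or_false, Bool.or_self, reduceIte] <;> rfl
  rw [Bool.not_eq_true] at h7
  rw [List.foldl_cons, pvStep_skip _ _ _ _ _ _ (by rw [e1]; exact h7)]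
  by_cases h8 : PySem.Str.isIn "cancer" hc = true
  · rw [List.foldl_cons, pvStep_hit _ _ _ _ _ (by rw [e1]; exact h8),
        pvFold_keep _ _ _ _ (by decide)]
    simp only [h0, h1, h2, h3, h4, h5, h6, h7, h8, List.any_cons, List.any_nil, Bool.true_or, Bool.or_true, Bool.false_or, Bool.or_false, Bool.or_self, reduceIte] <;> rfl
  rw [Bool.not_eq_true] at h8
  rw [List.foldl_cons, pvStep_skip _ _ _ _ _ _ (by rw [e1]; exact h8)]
  by_cases h9 : PySem.Str.isIn "oncology" hc = true
  · rw [List.foldl_cons, pvStep_hit _ _ _ _ _ (by rw [e1]; exact h9),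
        pvFold_keep _ _ _ _ (by decide)]
    simp only [h0, h1, h2, h3, h4, h5, h6, h7, h8, h9, List.any_cons, List.any_nil, Bool.true_or, Bool.or_true, Bool.false_or, Bool.or_false, Bool.or_self, reduceIte] <;> rfl
  rw [Bool.not_eq_true] at h9
  rw [List.foldl_cons, pvStep_skip _ _ _ _ _ _ (by rw [e1]; exact h9)]
  by_cases h10 : PySem.Str.isIn "emergency" hc = true
  · rw [List.foldl_cons, pvStep_hit _ _ _ _ _ (by rw [e1]; exact h10),
        pvFold_keep _ _ _ _ (by decide)]
    simp only [h0, h1, h2, h3, h4, h5, h6, h7, h8, h9, h10, List.any_cons, List.any_nil, Bool.true_or, Bool.or_true, Bool.false_or, Bool.or_false, Bool.or_self, reduceIte] <;> rfl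
  rw [Bool.not_eq_true] at h10
  rw [List.foldl_cons, pvStep_skip _ _ _ _ _ _ (by rw [e1]; exact h10)]
  by_cases h11 : PySem.Str.isIn "heart" nm = true
  · rw [List.foldl_cons, pvStep_hit _ _ _ _ _ (by rw [e2]; exact h11),
        pvFold_keep _ _ _ _ (by decide)]
    simp only [h0, h1, h2, h3, h4, h5, h6, h7, h8, h9, h10, h11, List.any_cons, List.any_nil, Bool.true_or, Bool.or_true, Bool.false_or, Bool.or_false, Bool.or_self, reduceIte] <;> rfl
  rw [Bool.not_eq_true] at h11
  rw [List.foldl_cons, pvStep_skip _ _ _ _ _ _ (by rw [e2]; exact h11)]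
  by_cases h12 : PySem.Str.isIn "cardiac" nm = true
  · rw [List.foldl_cons, pvStep_hit _ _ _ _ _ (by rw [e2]; exact h12),
        pvFold_keep _ _ _ _ (by decide)]
    simp only [h0, h1, h2, h3, h4, h5, h6, h7, h8, h9, h10, h11, h12, List.any_cons, List.any_nil, Bool.true_or, Bool.or_true, Bool.false_or, Bool.or_false, Bool.or_self, reduceIte] <;> rfl
  rw [Bool.not_eq_true] at h12
  rw [List.foldl_cons, pvStep_skip _ _ _ _ _ _ (by rw [e2]; exact h12)]
  by_cases h13 : PySem.Str.isIn "cardio" nm = true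
  · rw [List.foldl_cons, pvStep_hit _ _ _ _ _ (by rw [e2]; exact h13),
        pvFold_keep _ _ _ _ (by decide)]
    simp only [h0, h1, h2, h3, h4, h5, h6, h7, h8, h9, h10, h11, h12, h13, List.any_cons, List.any_nil, Bool.true_or, Bool.or_true, Bool.false_or, Bool.or_false, Bool.or_self, reduceIte] <;> rfl
  rw [Bool.not_eq_true] at h13
  rw [List.foldl_cons, pvStep_skip _ _ _ _ _ _ (by rw [e2]; exact h13)]
  by_cases h14 : PySem.Str.isIn "bone" nm = true
  · rw [List.foldl_cons, pvStep_hit _ _ _ _ _ (by rw [e2]; exact h14),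
        pvFold_keep _ _ _ _ (by decide)]
    simp only [h0, h1, h2, h3, h4, h5, h6, h7, h8, h9, h10, h11, h12, h13, h14, List.any_cons, List.any_nil, Bool.true_or, Bool.or_true, Bool.false_or, Bool.or_false, Bool.or_self, reduceIte] <;> rfl
  rw [Bool.not_eq_true] at h14
  rw [List.foldl_cons, pvStep_skip _ _ _ _ _ _ (by rw [e2]; exact h14)]
  by_cases h15 : PySem.Str.isIn "joint" nm = true
  · rw [List.foldl_cons, pvStep_hit _ _ _ _ _ (by rw [e2]; exact h15),
        pvFold_keep _ _ _ _ (by decide)]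
    simp only [h0, h1, h2, h3, h4, h5, h6, h7, h8, h9, h10, h11, h12, h13, h14, h15, List.any_cons, List.any_nil, Bool.true_or, Bool.or_true, Bool.false_or, Bool.or_false, Bool.or_self, reduceIte] <;> rfl
  rw [Bool.not_eq_true] at h15
  rw [List.foldl_cons, pvStep_skip _ _ _ _ _ _ (by rw [e2]; exact h15)]
  by_cases h16 : PySem.Str.isIn "orthopedic" nm = true
  · rw [List.foldl_cons, pvStep_hit _ _ _ _ _ (by rw [e2]; exact h16),
        pvFold_keep _ _ _ _ (by decide)]
    simp only [h0, h1, h2, h3, h4, h5, h6, h7, h8, h9, h10, h11, h12, h13, h14, h15, h16, List.any_cons, List.any_nil, Bool.true_or, Bool.or_true, Bool.false_or, Bool.or_false, Bool.or_self, reduceIte] <;> rfl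
  rw [Bool.not_eq_true] at h16
  rw [List.foldl_cons, pvStep_skip _ _ _ _ _ _ (by rw [e2]; exact h16)]
  by_cases h17 : PySem.Str.isIn "orthopaedic" nm = true
  · rw [List.foldl_cons, pvStep_hit _ _ _ _ _ (by rw [e2]; exact h17),
        pvFold_keep _ _ _ _ (by decide)]
    simp only [h0, h1, h2, h3, h4, h5, h6, h7, h8, h9, h10, h11, h12, h13, h14, h15, h16, h17, List.any_cons, List.any_nil, Bool.true_or, Bool.or_true, Bool.false_or, Bool.or_false, Bool.or_self, reduceIte] <;> rfl
  rw [Bool.not_eq_true] at h17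
  rw [List.foldl_cons, pvStep_skip _ _ _ _ _ _ (by rw [e2]; exact h17)]
  by_cases h18 : PySem.Str.isIn "brain" nm = true
  · rw [List.foldl_cons, pvStep_hit _ _ _ _ _ (by rw [e2]; exact h18),
        pvFold_keep _ _ _ _ (by decide)]
    simp only [h0, h1, h2, h3, h4, h5, h6, h7, h8, h9, h10, h11, h12, h13, h14, h15, h16, h17, h18, List.any_cons, List.any_nil, Bool.true_or, Bool.or_true, Bool.false_or, Bool.or_false, Bool.or_self, reduceIte] <;> rfl
  rw [Bool.not_eq_true] at h18
  rw [List.foldl_cons, pvStep_skip _ _ _ _ _ _ (by rw [e2]; exact h18)]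
  by_cases h19 : PySem.Str.isIn "neuro" nm = true
  · rw [List.foldl_cons, pvStep_hit _ _ _ _ _ (by rw [e2]; exact h19),
        pvFold_keep _ _ _ _ (by decide)]
    simp only [h0, h1, h2, h3, h4, h5, h6, h7, h8, h9, h10, h11, h12, h13, h14, h15, h16, h17, h18, h19, List.any_cons, List.any_nil, Bool.true_or, Bool.or_true, Bool.false_or, Bool.or_false, Bool.or_self, reduceIte] <;> rfl
  rw [Bool.not_eq_true] at h19
  rw [List.foldl_cons, pvStep_skip _ _ _ _ _ _ (by rw [e2]; exact h19)]
  by_cases h20 : PySem.Str.isIn "neurological" nm = true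
  · rw [List.foldl_cons, pvStep_hit _ _ _ _ _ (by rw [e2]; exact h20),
        pvFold_keep _ _ _ _ (by decide)]
    simp only [h0, h1, h2, h3, h4, h5, h6, h7, h8, h9, h10, h11, h12, h13, h14, h15, h16, h17, h18, h19, h20, List.any_cons, List.any_nil, Bool.true_or, Bool.or_true, Bool.false_or, Bool.or_false, Bool.or_self, reduceIte] <;> rfl
  rw [Bool.not_eq_true] at h20
  rw [List.foldl_cons, pvStep_skip _ _ _ _ _ _ (by rw [e2]; exact h20)]
  by_cases h21 : PySem.Str.isIn "children" nm = true
  · rw [List.foldl_cons, pvStep_hit _ _ _ _ _ (by rw [e2]; exact h21),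
        pvFold_keep _ _ _ _ (by decide)]
    simp only [h0, h1, h2, h3, h4, h5, h6, h7, h8, h9, h10, h11, h12, h13, h14, h15, h16, h17, h18, h19, h20, h21, List.any_cons, List.any_nil, Bool.true_or, Bool.or_true, Bool.false_or, Bool.or_false, Bool.or_self, reduceIte] <;> rfl
  rw [Bool.not_eq_true] at h21
  rw [List.foldl_cons, pvStep_skip _ _ _ _ _ _ (by rw [e2]; exact h21)]
  by_cases h22 : PySem.Str.isIn "pediatric" nm = true
  · rw [List.foldl_cons, pvStep_hit _ _ _ _ _ (by rw [e2]; exact h22),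
        pvFold_keep _ _ _ _ (by decide)]
    simp only [h0, h1, h2, h3, h4, h5, h6, h7, h8, h9, h10, h11, h12, h13, h14, h15, h16, h17, h18, h19, h20, h21, h22, List.any_cons, List.any_nil, Bool.true_or, Bool.or_true, Bool.false_or, Bool.or_false, Bool.or_self, reduceIte] <;> rfl
  rw [Bool.not_eq_true] at h22
  rw [List.foldl_cons, pvStep_skip _ _ _ _ _ _ (by rw [e2]; exact h22)]
  by_cases h23 : PySem.Str.isIn "paediatric" nm = true
  · rw [List.foldl_cons, pvStep_hit _ _ _ _ _ (by rw [e2]; exact h23),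
        pvFold_keep _ _ _ _ (by decide)]
    simp only [h0, h1, h2, h3, h4, h5, h6, h7, h8, h9, h10, h11, h12, h13, h14, h15, h16, h17, h18, h19, h20, h21, h22, h23, List.any_cons, List.any_nil, Bool.true_or, Bool.or_true, Bool.false_or, Bool.or_false, Bool.or_self, reduceIte] <;> rfl
  rw [Bool.not_eq_true] at h23
  rw [List.foldl_cons, pvStep_skip _ _ _ _ _ _ (by rw [e2]; exact h23)]
  by_cases h24 : PySem.Str.isIn "kids" nm = true
  · rw [List.foldl_cons, pvStep_hit _ _ _ _ _ (by rw [e2]; exact h24),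
        pvFold_keep _ _ _ _ (by decide)]
    simp only [h0, h1, h2, h3, h4, h5, h6, h7, h8, h9, h10, h11, h12, h13, h14, h15, h16, h17, h18, h19, h20, h21, h22, h23, h24, List.any_cons, List.any_nil, Bool.true_or, Bool.or_true, Bool.false_or, Bool.or_false, Bool.or_self, reduceIte] <;> rfl
  rw [Bool.not_eq_true] at h24
  rw [List.foldl_cons, pvStep_skip _ _ _ _ _ _ (by rw [e2]; exact h24)]
  by_cases h25 : PySem.Str.isIn "cancer" nm = true
  · rw [List.foldl_cons, pvStep_hit _ _ _ _ _ (by rw [e2]; exact h25),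
        pvFold_keep _ _ _ _ (by decide)]
    simp only [h0, h1, h2, h3, h4, h5, h6, h7, h8, h9, h10, h11, h12, h13, h14, h15, h16, h17, h18, h19, h20, h21, h22, h23, h24, h25, List.any_cons, List.any_nil, Bool.true_or, Bool.or_true, Bool.false_or, Bool.or_false, Bool.or_self, reduceIte] <;> rfl
  rw [Bool.not_eq_true] at h25
  rw [List.foldl_cons, pvStep_skip _ _ _ _ _ _ (by rw [e2]; exact h25)]
  by_cases h26 : PySem.Str.isIn "oncology" nm = true
  · rw [List.foldl_cons, pvStep_hit _ _ _ _ _ (by rw [e2]; exact h26),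
        pvFold_keep _ _ _ _ (by decide)]
    simp only [h0, h1, h2, h3, h4, h5, h6, h7, h8, h9, h10, h11, h12, h13, h14, h15, h16, h17, h18, h19, h20, h21, h22, h23, h24, h25, h26, List.any_cons, List.any_nil, Bool.true_or, Bool.or_true, Bool.false_or, Bool.or_false, Bool.or_self, reduceIte] <;> rfl
  rw [Bool.not_eq_true] at h26
  rw [List.foldl_cons, pvStep_skip _ _ _ _ _ _ (by rw [e2]; exact h26)]
  by_cases h27 : PySem.Str.isIn "tumor" nm = true
  · rw [List.foldl_cons, pvStep_hit _ _ _ _ _ (by rw [e2]; exact h27),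
        pvFold_keep _ _ _ _ (by decide)]
    simp only [h0, h1, h2, h3, h4, h5, h6, h7, h8, h9, h10, h11, h12, h13, h14, h15, h16, h17, h18, h19, h20, h21, h22, h23, h24, h25, h26, h27, List.any_cons, List.any_nil, Bool.true_or, Bool.or_true, Bool.false_or, Bool.or_false, Bool.or_self, reduceIte] <;> rfl
  rw [Bool.not_eq_true] at h27
  rw [List.foldl_cons, pvStep_skip _ _ _ _ _ _ (by rw [e2]; exact h27)]
  by_cases h28 : PySem.Str.isIn "emergency" nm = true
  · rw [List.foldl_cons, pvStep_hit _ _ _ _ _ (by rw [e2]; exact h28),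
        pvFold_keep _ _ _ _ (by decide)]
    simp only [h0, h1, h2, h3, h4, h5, h6, h7, h8, h9, h10, h11, h12, h13, h14, h15, h16, h17, h18, h19, h20, h21, h22, h23, h24, h25, h26, h27, h28, List.any_cons, List.any_nil, Bool.true_or, Bool.or_true, Bool.false_or, Bool.or_false, Bool.or_self, reduceIte] <;> rfl
  rw [Bool.not_eq_true] at h28
  rw [List.foldl_cons, pvStep_skip _ _ _ _ _ _ (by rw [e2]; exact h28)]
  by_cases h29 : PySem.Str.isIn "trauma" nm = true
  · rw [List.foldl_cons, pvStep_hit _ _ _ _ _ (by rw [e2]; exact h29),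
        pvFold_keep _ _ _ _ (by decide)]
    simp only [h0, h1, h2, h3, h4, h5, h6, h7, h8, h9, h10, h11, h12, h13, h14, h15, h16, h17, h18, h19, h20, h21, h22, h23, h24, h25, h26, h27, h28, h29, List.any_cons, List.any_nil, Bool.true_or, Bool.or_true, Bool.false_or, Bool.or_false, Bool.or_self, reduceIte] <;> rfl
  rw [Bool.not_eq_true] at h29
  rw [List.foldl_cons, pvStep_skip _ _ _ _ _ _ (by rw [e2]; exact h29)]
  by_cases h30 : PySem.Str.isIn "urgent" nm = true
  · rw [List.foldl_cons, pvStep_hit _ _ _ _ _ (by rw [e2]; exact h30),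
        pvFold_keep _ _ _ _ (by decide)]
    simp only [h0, h1, h2, h3, h4, h5, h6, h7, h8, h9, h10, h11, h12, h13, h14, h15, h16, h17, h18, h19, h20, h21, h22, h23, h24, h25, h26, h27, h28, h29, h30, List.any_cons, List.any_nil, Bool.true_or, Bool.or_true, Bool.false_or, Bool.or_false, Bool.or_self, reduceIte] <;> rfl
  rw [Bool.not_eq_true] at h30
  rw [List.foldl_cons, pvStep_skip _ _ _ _ _ _ (by rw [e2]; exact h30)]
  by_cases h31 : PySem.Str.isIn "women" nm = true
  · rw [List.foldl_cons, pvStep_hit _ _ _ _ _ (by rw [e2]; exact h31),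
        pvFold_keep _ _ _ _ (by decide)]
    simp only [h0, h1, h2, h3, h4, h5, h6, h7, h8, h9, h10, h11, h12, h13, h14, h15, h16, h17, h18, h19, h20, h21, h22, h23, h24, h25, h26, h27, h28, h29, h30, h31, List.any_cons, List.any_nil, Bool.true_or, Bool.or_true, Bool.false_or, Bool.or_false, Bool.or_self, reduceIte] <;> rfl
  rw [Bool.not_eq_true] at h31
  rw [List.foldl_cons, pvStep_skip _ _ _ _ _ _ (by rw [e2]; exact h31)]
  by_cases h32 : PySem.Str.isIn "maternity" nm = true
  · rw [List.foldl_cons, pvStep_hit _ _ _ _ _ (by rw [e2]; exact h32),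
        pvFold_keep _ _ _ _ (by decide)]
    simp only [h0, h1, h2, h3, h4, h5, h6, h7, h8, h9, h10, h11, h12, h13, h14, h15, h16, h17, h18, h19, h20, h21, h22, h23, h24, h25, h26, h27, h28, h29, h30, h31, h32, List.any_cons, List.any_nil, Bool.true_or, Bool.or_true, Bool.false_or, Bool.or_false, Bool.or_self, reduceIte] <;> rfl
  rw [Bool.not_eq_true] at h32
  rw [List.foldl_cons, pvStep_skip _ _ _ _ _ _ (by rw [e2]; exact h32)]
  by_cases h33 : PySem.Str.isIn "obstetric" nm = true
  · rw [List.foldl_cons, pvStep_hit _ _ _ _ _ (by rw [e2]; exact h33),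
        pvFold_keep _ _ _ _ (by decide)]
    simp only [h0, h1, h2, h3, h4, h5, h6, h7, h8, h9, h10, h11, h12, h13, h14, h15, h16, h17, h18, h19, h20, h21, h22, h23, h24, h25, h26, h27, h28, h29, h30, h31, h32, h33, List.any_cons, List.any_nil, Bool.true_or, Bool.or_true, Bool.false_or, Bool.or_false, Bool.or_self, reduceIte] <;> rfl
  rw [Bool.not_eq_true] at h33
  rw [List.foldl_cons, pvStep_skip _ _ _ _ _ _ (by rw [e2]; exact h33)]
  by_cases h34 : PySem.Str.isIn "eye" nm = true
  · rw [List.foldl_cons, pvStep_hit _ _ _ _ _ (by rw [e2]; exact h34),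
        pvFold_keep _ _ _ _ (by decide)]
    simp only [h0, h1, h2, h3, h4, h5, h6, h7, h8, h9, h10, h11, h12, h13, h14, h15, h16, h17, h18, h19, h20, h21, h22, h23, h24, h25, h26, h27, h28, h29, h30, h31, h32, h33, h34, List.any_cons, List.any_nil, Bool.true_or, Bool.or_true, Bool.false_or, Bool.or_false, Bool.or_self, reduceIte] <;> rfl
  rw [Bool.not_eq_true] at h34
  rw [List.foldl_cons, pvStep_skip _ _ _ _ _ _ (by rw [e2]; exact h34)]
  by_cases h35 : PySem.Str.isIn "vision" nm = true
  · rw [List.foldl_cons, pvStep_hit _ _ _ _ _ (by rw [e2]; exact h35),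
        pvFold_keep _ _ _ _ (by decide)]
    simp only [h0, h1, h2, h3, h4, h5, h6, h7, h8, h9, h10, h11, h12, h13, h14, h15, h16, h17, h18, h19, h20, h21, h22, h23, h24, h25, h26, h27, h28, h29, h30, h31, h32, h33, h34, h35, List.any_cons, List.any_nil, Bool.true_or, Bool.or_true, Bool.false_or, Bool.or_false, Bool.or_self, reduceIte] <;> rfl
  rw [Bool.not_eq_true] at h35
  rw [List.foldl_cons, pvStep_skip _ _ _ _ _ _ (by rw [e2]; exact h35)]
  by_cases h36 : PySem.Str.isIn "optical" nm = true
  · rw [List.foldl_cons, pvStep_hit _ _ _ _ _ (by rw [e2]; exact h36),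
        pvFold_keep _ _ _ _ (by decide)]
    simp only [h0, h1, h2, h3, h4, h5, h6, h7, h8, h9, h10, h11, h12, h13, h14, h15, h16, h17, h18, h19, h20, h21, h22, h23, h24, h25, h26, h27, h28, h29, h30, h31, h32, h33, h34, h35, h36, List.any_cons, List.any_nil, Bool.true_or, Bool.or_true, Bool.false_or, Bool.or_false, Bool.or_self, reduceIte] <;> rfl
  rw [Bool.not_eq_true] at h36
  rw [List.foldl_cons, pvStep_skip _ _ _ _ _ _ (by rw [e2]; exact h36)]
  by_cases h37 : PySem.Str.isIn "dental" nm = true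
  · rw [List.foldl_cons, pvStep_hit _ _ _ _ _ (by rw [e2]; exact h37),
        pvFold_keep _ _ _ _ (by decide)]
    simp only [h0, h1, h2, h3, h4, h5, h6, h7, h8, h9, h10, h11, h12, h13, h14, h15, h16, h17, h18, h19, h20, h21, h22, h23, h24, h25, h26, h27, h28, h29, h30, h31, h32, h33, h34, h35, h36, h37, List.any_cons, List.any_nil, Bool.true_or, Bool.or_true, Bool.false_or, Bool.or_false, Bool.or_self, reduceIte] <;> rfl
  rw [Bool.not_eq_true] at h37
  rw [List.foldl_cons, pvStep_skip _ _ _ _ _ _ (by rw [e2]; exact h37)]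
  by_cases h38 : PySem.Str.isIn "tooth" nm = true
  · rw [List.foldl_cons, pvStep_hit _ _ _ _ _ (by rw [e2]; exact h38),
        pvFold_keep _ _ _ _ (by decide)]
    simp only [h0, h1, h2, h3, h4, h5, h6, h7, h8, h9, h10, h11, h12, h13, h14, h15, h16, h17, h18, h19, h20, h21, h22, h23, h24, h25, h26, h27, h28, h29, h30, h31, h32, h33, h34, h35, h36, h37, h38, List.any_cons, List.any_nil, Bool.true_or, Bool.or_true, Bool.false_or, Bool.or_false, Bool.or_self, reduceIte] <;> rfl
  rw [Bool.not_eq_true] at h38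
  rw [List.foldl_cons, pvStep_skip _ _ _ _ _ _ (by rw [e2]; exact h38)]
  by_cases h39 : PySem.Str.isIn "oral" nm = true
  · rw [List.foldl_cons, pvStep_hit _ _ _ _ _ (by rw [e2]; exact h39),
        pvFold_keep _ _ _ _ (by decide)]
    simp only [h0, h1, h2, h3, h4, h5, h6, h7, h8, h9, h10, h11, h12, h13, h14, h15, h16, h17, h18, h19, h20, h21, h22, h23, h24, h25, h26, h27, h28, h29, h30, h31, h32, h33, h34, h35, h36, h37, h38, h39, List.any_cons, List.any_nil, Bool.true_or, Bool.or_true, Bool.false_or, Bool.or_false, Bool.or_self, reduceIte] <;> rfl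
  rw [Bool.not_eq_true] at h39
  rw [List.foldl_cons, pvStep_skip _ _ _ _ _ _ (by rw [e2]; exact h39)]
  by_cases h40 : PySem.Str.isIn "skin" nm = true
  · rw [List.foldl_cons, pvStep_hit _ _ _ _ _ (by rw [e2]; exact h40),
        pvFold_keep _ _ _ _ (by decide)]
    simp only [h0, h1, h2, h3, h4, h5, h6, h7, h8, h9, h10, h11, h12, h13, h14, h15, h16, h17, h18, h19, h20, h21, h22, h23, h24, h25, h26, h27, h28, h29, h30, h31, h32, h33, h34, h35, h36, h37, h38, h39, h40, List.any_cons, List.any_nil, Bool.true_or, Bool.or_true, Bool.false_or, Bool.or_false, Bool.or_self, reduceIte] <;> rfl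
  rw [Bool.not_eq_true] at h40
  rw [List.foldl_cons, pvStep_skip _ _ _ _ _ _ (by rw [e2]; exact h40)]
  by_cases h41 : PySem.Str.isIn "dermatology" nm = true
  · rw [List.foldl_cons, pvStep_hit _ _ _ _ _ (by rw [e2]; exact h41),
        pvFold_keep _ _ _ _ (by decide)]
    simp only [h0, h1, h2, h3, h4, h5, h6, h7, h8, h9, h10, h11, h12, h13, h14, h15, h16, h17, h18, h19, h20, h21, h22, h23, h24, h25, h26, h27, h28, h29, h30, h31, h32, h33, h34, h35, h36, h37, h38, h39, h40, h41, List.any_cons, List.any_nil, Bool.true_or, Bool.or_true, Bool.false_or, Bool.or_false, Bool.or_self, reduceIte] <;> rfl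
  rw [Bool.not_eq_true] at h41
  rw [List.foldl_cons, pvStep_skip _ _ _ _ _ _ (by rw [e2]; exact h41)]
  rw [List.foldl_nil]
  simp only [h0, h1, h2, h3, h4, h5, h6, h7, h8, h9, h10, h11, h12, h13, h14, h15, h16, h17, h18, h19, h20, h21, h22, h23, h24, h25, h26, h27, h28, h29, h30, h31, h32, h33, h34, h35, h36, h37, h38, h39, h40, h41, List.any_cons, List.any_nil, Bool.true_or, Bool.or_true, Bool.false_or, Bool.or_false, Bool.or_self, reduceIte]
  change (if am = "hospital" then "General Medicine" else if am = "clinic" then "General Practice" else "General Practice") = (if am = "hospital" then "General Medicine" else "General Practice")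
  split_ifs <;> rfl
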